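-- pv_equiv track=rewrite | github.com/fightnyy/Algorithm | BOJ/dfs/2504.py | solve
-- ===== SOURCE A (Python) =====
-- def solve(paren):
--     stack = []
--     for v in paren:
--         if v == ']':
--             t = 0
--             while stack:
--                 top=stack.pop()
--                 if top == '[':
--                     if t == 0:
--                         t = 3
--                     else :
--                         t *= 3
--                     stack.append(t)
--                     break
--                 elif top == '(':
--                     return 0
--                 else :
--                     t+=top
--
--             if not stack:
--                 return 0
--
--         elif v == ')':
--             t = 0
--             while stack:
--                 top=stack.pop()
--                 if top == '(':
--                     if t == 0:
--                         t = 2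
--                     else :
--                         t *= 2
--                     stack.append(t)
--                     break
--                 elif top == '[':
--                     return 0
--                 else :
--                     t+=top
--             if not stack:
--                 return 0
--         else :
--             stack.append(v)
--     try:
--         stack=sum(stack)
--     except :
--         return 0
--     return stack
-- ===== SOURCE B (Python) =====
-- def solve(paren):
--     stack = []
--     temp = 1
--     answer = 0
--     prev = None
--     for c in paren:
--         if c == '(' or c == '[':
--             stack.append(c)
--             temp *= 2 if c == '(' else 3
--         elif c == ')' or c == ']':
--             m = '(' if c == ')' else '['
--             if not stack or stack[-1] != m:
--                 return 0
--             if prev == m: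
--                 answer += temp
--             stack.pop()
--             temp //= 2 if c == ')' else 3
--         else:
--             return 0
--         prev = c
--     return answer if not stack else 0
-- ===== Notes on version B (the rewrite author's own statement) =====
-- stated objective: simpler
-- what changed: Replaced A's mixed char/int stack with inner pop-and-sum while-loops and a final sum() by a single left-to-right pass keeping only a stack of open brackets, a running multiplier and an accumulator collecting the multiplier at each innermost pair (no element is ever pushed twice, no final summation).
-- outside the precondition, e.g. on solve('a()'): A returns 0, B returns 0
import Mathlib
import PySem

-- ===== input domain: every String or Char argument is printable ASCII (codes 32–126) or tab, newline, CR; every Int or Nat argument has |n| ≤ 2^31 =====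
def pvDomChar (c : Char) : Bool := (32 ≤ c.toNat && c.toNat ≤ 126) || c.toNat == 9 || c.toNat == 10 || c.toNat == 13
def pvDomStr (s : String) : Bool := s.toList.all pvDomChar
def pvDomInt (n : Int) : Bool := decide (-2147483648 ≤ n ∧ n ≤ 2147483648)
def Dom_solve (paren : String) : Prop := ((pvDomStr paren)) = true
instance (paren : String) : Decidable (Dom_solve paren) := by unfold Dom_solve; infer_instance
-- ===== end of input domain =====

-- B replaces A's mixed char/value stack and inner pop-loops by a single pass with a
-- running multiplier and accumulator (objective: simpler). Return value only; A mutates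
-- nothing observable.

-- ===== PORT A =====

-- an element of A's Python stack: a character or an int value
inductive AEl where
  | ch : Char → AEl
  | iv : Int → AEl
deriving DecidableEq, Repr

-- the inner 'while stack:' loop of A for a closing bracket: o = matching open,
-- wrong = the other open, m = multiplier. 'none' = Python 'return 0'.
-- When the popped top is a char that is neither open bracket, Python adds the char into the int t and raises TypeError; that input is excluded by Pre_solve, and the
-- port returns none there (never reached inside Pre_solve).
def popA (o wrong : Char) (m : Int) : List AEl → Int → Option (List AEl)
  | [], _ => none                                   -- while ends, 'if not stack: return 0'
  | AEl.ch c :: rest, t =>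
      if c = o then some (AEl.iv (if t = 0 then m else t * m) :: rest)
      else if c = wrong then none
      else none                                     -- Python: TypeError (outside Pre_solve)
  | AEl.iv v :: rest, t => popA o wrong m rest (t + v)

-- 'sum(stack)': some total if all elements are ints (Python sums bottom-to-top;
-- addition is commutative so summing the cons-list is the same value), none if a
-- char is present (TypeError, caught: 'except: return 0')
def sumA : List AEl → Option Int
  | [] => some 0
  | AEl.iv v :: rest => (sumA rest).map (· + v)
  | AEl.ch _ :: _ => none

def loopA : List Char → List AEl → Int
  | [], stack => match sumA stack with | some s => s | none => 0
  | v :: vs, stack =>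
      if v = ']' then
        match popA '[' '(' 3 stack 0 with
        | none => 0
        | some s => loopA vs s
      else if v = ')' then
        match popA '(' '[' 2 stack 0 with
        | none => 0
        | some s => loopA vs s
      else loopA vs (AEl.ch v :: stack)

def solve (paren : String) : Int := loopA paren.toList []

-- ===== PORT B =====

-- B's loop state: stack of open brackets, running multiplier temp, accumulator
-- answer, previous character (none before the first iteration, as Python's None)
def loopB : List Char → List Char → Int → Int → Option Char → Int
  | [], stack, _, answer, _ => if stack = [] then answer else 0
  | c :: cs, stack, temp, answer, prev =>
      if c = '(' ∨ c = '[' then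
        loopB cs (c :: stack) (temp * (if c = '(' then 2 else 3)) answer (some c)
      else if c = ')' ∨ c = ']' then
        let m : Char := if c = ')' then '(' else '['
        match stack with
        | [] => 0
        | top :: rest =>
            if top ≠ m then 0
            else loopB cs rest (PySem.Int.floordiv temp (if c = ')' then 2 else 3))
                   (if prev = some m then answer + temp else answer) (some c)
      else 0

def solve_alt (paren : String) : Int := loopB paren.toList [] 1 0 none

-- ===== PRECONDITION & SPEC =====

def isBr (c : Char) : Bool := c = '(' || c = ')' || c = '[' || c = ']'

-- Pre_solve excludes strings with a ')' or ']' anywhere after a non-bracket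
-- character: on those A either raises an uncaught TypeError (adding a stack character into the int accumulator) or returns 0 just like B (see cites).
def Pre_solve (paren : String) : Prop :=
  (paren.toList.dropWhile isBr).all (fun c => ¬(c = ')' ∨ c = ']')) = true
instance (paren : String) : Decidable (Pre_solve paren) := by unfold Pre_solve; infer_instance

def pvWitness_solve : String := "(()[[]])([])"

def Spec_solve (paren : String) (out : Int) : Prop := out = solve_alt paren
instance (paren : String) (out : Int) : Decidable (Spec_solve paren out) := by unfold Spec_solve; infer_instance

-- ===== CLAIM (what is proved, stated in full; the proofs are below) =====
def Claim_equal_solve : Prop := ∀ (paren : String), Dom_solve paren → Pre_solve paren → Spec_solve paren (solve paren)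

-- ===== LEMMAS AND PROOFS =====

-- weight of an open bracket
def wt (c : Char) : Int := if c = '(' then 2 else 3

-- product of weights of a list of open brackets
def wprod : List Char → Int
  | [] => 1
  | c :: r => wt c * wprod r

-- the open brackets on A's stack, top first
def opensOf : List AEl → List Char
  | [] => []
  | AEl.ch c :: r => c :: opensOf r
  | AEl.iv _ :: r => opensOf r

-- accumulated value of A's stack: each int times the weights of the opens below it
def sval : List AEl → Int
  | [] => 0
  | AEl.ch _ :: r => sval r
  | AEl.iv v :: r => v * wprod (opensOf r) + sval r

-- sum of the leading run of int elements / the stack after that run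
def leadSum : List AEl → Int
  | AEl.iv v :: r => v + leadSum r
  | _ => 0
def stripIv : List AEl → List AEl
  | AEl.iv _ :: r => stripIv r
  | s => s

-- every stack element is '(' , '[' or a positive int
def GoodS (S : List AEl) : Prop :=
  ∀ e ∈ S, e = AEl.ch '(' ∨ e = AEl.ch '[' ∨ ∃ v : Int, 0 < v ∧ e = AEl.iv v

-- relation between B's prev character and the top of A's stack
def PrevRel (prev : Option Char) (S : List AEl) : Prop :=
  match prev with
  | none => S = []
  | some c =>
      if c = '(' ∨ c = '[' then S.head? = some (AEl.ch c)
      else (c = ')' ∨ c = ']') ∧ ∃ v, S.head? = some (AEl.iv v)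

theorem goodS_tail {e : AEl} {S : List AEl} (h : GoodS (e :: S)) : GoodS S :=
  fun x hx => h x (List.mem_cons_of_mem _ hx)

theorem goodS_strip {S : List AEl} (h : GoodS S) : GoodS (stripIv S) := by
  induction S with
  | nil => exact h
  | cons e r ih =>
    cases e with
    | ch c => exact h
    | iv v => exact ih (goodS_tail h)

theorem leadSum_nonneg {S : List AEl} (h : GoodS S) : 0 ≤ leadSum S := by
  induction S with
  | nil => simp [leadSum]
  | cons e r ih =>
    cases e with
    | ch c => simp [leadSum]
    | iv v =>
      have hv := h (AEl.iv v) (List.mem_cons_self ..)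
      have hvpos : 0 < v := by rcases hv with h1 | h1 | ⟨w, hw, h1⟩ <;> simp_all
      have hr := ih (goodS_tail h)
      simp only [leadSum]; omega

theorem leadSum_pos {v : Int} {r : List AEl} (h : GoodS (AEl.iv v :: r)) :
    0 < leadSum (AEl.iv v :: r) := by
  have hv := h (AEl.iv v) (List.mem_cons_self ..)
  have hr := leadSum_nonneg (goodS_tail h)
  have hvpos : 0 < v := by rcases hv with h1 | h1 | ⟨w, hw, h1⟩ <;> simp_all
  simp only [leadSum]; omega

theorem opensOf_strip (S : List AEl) : opensOf S = opensOf (stripIv S) := by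
  induction S with
  | nil => rfl
  | cons e r ih => cases e with
    | ch c => rfl
    | iv v => simpa [opensOf, stripIv] using ih

theorem sval_strip (S : List AEl) :
    sval S = leadSum S * wprod (opensOf S) + sval (stripIv S) := by
  induction S with
  | nil => simp [sval, leadSum, stripIv]
  | cons e r ih => cases e with
    | ch c => simp [sval, leadSum, stripIv]
    | iv v => simp only [sval, leadSum, stripIv, opensOf, ih]; ring

-- stripIv always returns [] or a char-headed list
theorem stripIv_shape (S : List AEl) :
    stripIv S = [] ∨ ∃ c rest, stripIv S = AEl.ch c :: rest := by
  induction S with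
  | nil => left; rfl
  | cons e r ih => cases e with
    | ch c => right; exact ⟨c, r, rfl⟩
    | iv v => exact ih

-- characterisation of A's inner pop loop on a good stack
theorem popA_spec (o wrong : Char) (m : Int) :
    ∀ (S : List AEl) (t : Int), GoodS S → 0 ≤ t →
    popA o wrong m S t =
      (match stripIv S with
       | AEl.ch c :: rest =>
           if c = o then
             some (AEl.iv (if t + leadSum S = 0 then m else (t + leadSum S) * m) :: rest)
           else none
       | _ => none) := by
  intro S
  induction S with
  | nil => intro t _ _; rfl
  | cons e r ih =>
    intro t hg ht
    cases e with
    | ch c =>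
      simp only [popA, stripIv, leadSum]
      by_cases hc : c = o
      · simp [hc, add_zero]
      · simp [hc]
    | iv v =>
      have hv := hg (AEl.iv v) (List.mem_cons_self ..)
      have hvpos : 0 < v := by
        rcases hv with h1 | h1 | ⟨w, hw, h1⟩ <;> simp_all
      simp only [popA, stripIv, leadSum]
      rw [ih (t + v) (goodS_tail hg) (by omega)]
      have : t + (v + leadSum r) = t + v + leadSum r := by ring
      rw [this]

-- sum(stack) on an all-int stack
theorem sumA_allIv {S : List AEl} (hg : GoodS S) (h : opensOf S = []) :
    sumA S = some (sval S) := by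
  induction S with
  | nil => rfl
  | cons e r ih =>
    cases e with
    | ch c => simp [opensOf] at h
    | iv v =>
      simp only [opensOf] at h
      simp [sumA, sval, ih (goodS_tail hg) h, h, wprod]
      ring

theorem sumA_hasCh {S : List AEl} (hg : GoodS S) (h : opensOf S ≠ []) :
    sumA S = none := by
  induction S with
  | nil => simp [opensOf] at h
  | cons e r ih =>
    cases e with
    | ch c => rfl
    | iv v =>
      simp only [opensOf] at h
      simp [sumA, ih (goodS_tail hg) h]

-- once a non-bracket char is on the stack and no closer remains, A returns 0
theorem loopA_stuck {d : Char} : ∀ (vs : List Char) (S : List AEl),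
    (∀ c ∈ vs, ¬(c = ')' ∨ c = ']')) → AEl.ch d ∈ S → loopA vs S = 0 := by
  intro vs
  induction vs with
  | nil =>
    intro S _ hmem
    have : sumA S = none := by
      induction S with
      | nil => simp at hmem
      | cons e r ih =>
        cases e with
        | ch c => rfl
        | iv v =>
          rcases List.mem_cons.mp hmem with h | h
          · exact absurd h (by simp)
          · simp [sumA, ih h]
    simp [loopA, this]
  | cons v vs ih =>
    intro S hnc hmem
    have hv := hnc v (List.mem_cons_self ..)
    have h1 : v ≠ ']' := fun h => hv (Or.inr h)
    have h2 : v ≠ ')' := fun h => hv (Or.inl h)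
    simp only [loopA, if_neg h1, if_neg h2]
    exact ih _ (fun c hc => hnc c (List.mem_cons_of_mem _ hc))
          (List.mem_cons_of_mem _ hmem)

-- prev is the matching open ↔ the pop loop finds it with no values on top
theorem prev_iff_leadZero {S : List AEl} {prev : Option Char} {c : Char} {rest : List AEl}
    (hg : GoodS S) (hprev : PrevRel prev S) (hc : c = '(' ∨ c = '[')
    (hstrip : stripIv S = AEl.ch c :: rest) :
    (prev = some c ↔ leadSum S = 0) := by
  constructor
  · intro h
    subst h
    simp only [PrevRel, if_pos hc] at hprev
    cases S with
    | nil => simp at hprev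
    | cons e tail =>
      simp only [List.head?] at hprev
      cases e with
      | ch d => simp only [leadSum]
      | iv v => simp at hprev
  · intro hL
    cases S with
    | nil => simp [stripIv] at hstrip
    | cons e tail =>
      cases e with
      | iv v =>
        have := leadSum_pos hg
        omega
      | ch d =>
        have hd : d = c := by
          simp only [stripIv, List.cons.injEq, AEl.ch.injEq] at hstrip
          exact hstrip.1
        cases prev with
        | none => simp [PrevRel] at hprev
        | some p =>
          simp only [PrevRel] at hprev
          by_cases hp : p = '(' ∨ p = '['
          · rw [if_pos hp] at hprev
            simp only [List.head?, Option.some.injEq] at hprev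
            have : p = d := (AEl.ch.inj hprev.symm)
            rw [this, hd]
          · rw [if_neg hp] at hprev
            rcases hprev.2 with ⟨w, hw⟩
            simp at hw

theorem main_loop : ∀ (vs : List Char) (S : List AEl) (prev : Option Char),
    GoodS S →
    ((vs.dropWhile isBr).all (fun c => ¬(c = ')' ∨ c = ']')) = true) →
    PrevRel prev S →
    loopA vs S = loopB vs (opensOf S) (wprod (opensOf S)) (sval S) prev := by
  intro vs
  induction vs with
  | nil =>
    intro S prev hg _ _
    by_cases h : opensOf S = []
    · simp [loopA, loopB, sumA_allIv hg h, h]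
    · simp [loopA, loopB, sumA_hasCh hg h, h]
  | cons v vs ih =>
    intro S prev hg hpre hprev
    by_cases hv1 : v = ']'
    case pos =>
      subst hv1
      rw [List.dropWhile_cons, if_pos (by decide : isBr ']' = true)] at hpre
      have hpop := popA_spec '[' '(' 3 S 0 hg le_rfl
      simp only [loopA, reduceIte, Char.reduceEq]
      rcases stripIv_shape S with hnil | ⟨c, rest, hstrip⟩
      · have hop : opensOf S = [] := by rw [opensOf_strip, hnil]; rfl
        rw [hpop, hnil]
        simp [loopB, hop]
      · have hgs := goodS_strip hg
        rw [hstrip] at hgs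
        have hcopen : c = '(' ∨ c = '[' := by
          rcases hgs (AEl.ch c) (List.mem_cons_self ..) with h | h | ⟨w, _, h⟩ <;> simp_all
        have hgrest : GoodS rest := goodS_tail hgs
        have hop : opensOf S = c :: opensOf rest := by
          rw [opensOf_strip, hstrip]; rfl
        have hsvstrip := sval_strip S
        rw [hstrip] at hsvstrip
        simp only [sval] at hsvstrip
        by_cases hcm : c = '['
        · subst hcm
          have hiff := prev_iff_leadZero hg hprev (Or.inr rfl) hstrip
          have hlead := leadSum_nonneg hg
          set V : Int := if leadSum S = 0 then 3 else leadSum S * 3 with hV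
          have hVpos : 0 < V := by
            rw [hV]; split <;> omega
          have hg' : GoodS (AEl.iv V :: rest) := by
            intro e he
            rcases List.mem_cons.mp he with h | h
            · exact Or.inr (Or.inr ⟨V, hVpos, h⟩)
            · exact hgrest e h
          have hrec := ih (AEl.iv V :: rest) (some ']') hg' hpre
            (by simp [PrevRel])
          simp only [opensOf, sval] at hrec
          rw [hpop, hstrip]
          simp only [reduceIte, zero_add, hV.symm]
          rw [hrec]
          simp only [loopB, hop, reduceIte, Char.reduceEq]
          have hdiv : PySem.Int.floordiv (wprod ('[' :: opensOf rest)) 3 = wprod (opensOf rest) := by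
            rw [PySem.Int.floordiv_eq_ediv_of_pos (by norm_num)]
            simp only [wprod, wt, if_neg (by decide : ¬('[' = '('))]
            exact Int.mul_ediv_cancel_left _ (by norm_num)
          rw [hdiv]
          by_cases hL : leadSum S = 0
          · have hprevEq : prev = some '[' := hiff.mpr hL
            rw [if_pos hprevEq]
            congr 1
            rw [hV, if_pos hL, hsvstrip, hL, hop]
            simp only [wprod, wt, reduceIte, Char.reduceEq]
            ring
          · have hprevNe : ¬ prev = some '[' := fun h => hL (hiff.mp h)
            rw [if_neg hprevNe]
            congr 1
            rw [hV, if_neg hL, hsvstrip, hop]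
            simp only [wprod, wt, reduceIte, Char.reduceEq]
            ring
        · have hcp : c = '(' := by tauto
          subst hcp
          rw [hpop, hstrip]
          simp only [loopB, hop, reduceIte, Char.reduceEq]
          rw [if_pos (show ('(':Char) ≠ '[' by decide)]
          simp
    case neg =>
    by_cases hv2 : v = ')'
    case pos =>
      subst hv2
      rw [List.dropWhile_cons, if_pos (by decide : isBr ')' = true)] at hpre
      have hpop := popA_spec '(' '[' 2 S 0 hg le_rfl
      simp only [loopA, reduceIte, Char.reduceEq]
      rcases stripIv_shape S with hnil | ⟨c, rest, hstrip⟩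
      · have hop : opensOf S = [] := by rw [opensOf_strip, hnil]; rfl
        rw [hpop, hnil]
        simp [loopB, hop]
      · have hgs := goodS_strip hg
        rw [hstrip] at hgs
        have hcopen : c = '(' ∨ c = '[' := by
          rcases hgs (AEl.ch c) (List.mem_cons_self ..) with h | h | ⟨w, _, h⟩ <;> simp_all
        have hgrest : GoodS rest := goodS_tail hgs
        have hop : opensOf S = c :: opensOf rest := by
          rw [opensOf_strip, hstrip]; rfl
        have hsvstrip := sval_strip S
        rw [hstrip] at hsvstrip
        simp only [sval] at hsvstrip
        by_cases hcm : c = '('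
        · subst hcm
          have hiff := prev_iff_leadZero hg hprev (Or.inl rfl) hstrip
          have hlead := leadSum_nonneg hg
          set V : Int := if leadSum S = 0 then 2 else leadSum S * 2 with hV
          have hVpos : 0 < V := by
            rw [hV]; split <;> omega
          have hg' : GoodS (AEl.iv V :: rest) := by
            intro e he
            rcases List.mem_cons.mp he with h | h
            · exact Or.inr (Or.inr ⟨V, hVpos, h⟩)
            · exact hgrest e h
          have hrec := ih (AEl.iv V :: rest) (some ')') hg' hpre
            (by simp [PrevRel])
          simp only [opensOf, sval] at hrec
          rw [hpop, hstrip]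
          simp only [reduceIte, zero_add, hV.symm]
          rw [hrec]
          simp only [loopB, hop, reduceIte, Char.reduceEq]
          have hdiv : PySem.Int.floordiv (wprod ('(' :: opensOf rest)) 2 = wprod (opensOf rest) := by
            rw [PySem.Int.floordiv_eq_ediv_of_pos (by norm_num)]
            simp only [wprod, wt, if_pos (rfl : '(' = '(')]
            exact Int.mul_ediv_cancel_left _ (by norm_num)
          rw [hdiv]
          by_cases hL : leadSum S = 0
          · have hprevEq : prev = some '(' := hiff.mpr hL
            rw [if_pos hprevEq]
            congr 1
            rw [hV, if_pos hL, hsvstrip, hL, hop]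
            simp only [wprod, wt, reduceIte, Char.reduceEq]
            ring
          · have hprevNe : ¬ prev = some '(' := fun h => hL (hiff.mp h)
            rw [if_neg hprevNe]
            congr 1
            rw [hV, if_neg hL, hsvstrip, hop]
            simp only [wprod, wt, reduceIte, Char.reduceEq]
            ring
        · have hcp : c = '[' := by tauto
          subst hcp
          rw [hpop, hstrip]
          simp only [loopB, hop, reduceIte, Char.reduceEq]
          rw [if_pos (show ('[':Char) ≠ '(' by decide)]
          simp
    case neg =>
    by_cases hv3 : v = '(' ∨ v = '['
    case pos =>
      rw [List.dropWhile_cons, if_pos (by rcases hv3 with h | h <;> subst h <;> decide)] at hpre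
      simp only [loopA, if_neg hv1, if_neg hv2]
      have hg' : GoodS (AEl.ch v :: S) := by
        intro e he
        rcases List.mem_cons.mp he with h | h
        · rcases hv3 with h3 | h3 <;> subst h3 <;> simp [h]
        · exact hg e h
      have hrec := ih (AEl.ch v :: S) (some v) hg' hpre
        (by simp [PrevRel, if_pos hv3])
      simp only [opensOf, sval] at hrec
      rw [hrec]
      simp only [loopB, if_pos hv3]
      have : wprod (v :: opensOf S) = wprod (opensOf S) * (if v = '(' then 2 else 3) := by
        simp only [wprod, wt]; ring
      rw [this]
    case neg =>
      have hbr : isBr v = false := by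
        simp only [isBr]
        rcases not_or.mp hv3 with ⟨h3, h4⟩
        simp [hv1, hv2, h3, h4]
      rw [List.dropWhile_cons, if_neg (by simp [hbr])] at hpre
      simp only [List.all_cons, Bool.and_eq_true] at hpre
      simp only [loopA, if_neg hv1, if_neg hv2]
      have hA := loopA_stuck (d := v) vs (AEl.ch v :: S)
        (by
          intro c hc
          have := List.all_eq_true.mp hpre.2 c hc
          simpa using this)
        (List.mem_cons_self ..)
      rw [hA]
      have hcl : ¬(v = ')' ∨ v = ']') := by tauto
      simp only [loopB, if_neg hv3, if_neg hcl]

-- ===== VERDICT (by name: the statement is the Claim_ definition above) =====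
theorem solve_spec : Claim_equal_solve := by
  intro paren _ hpre
  unfold Spec_solve solve solve_alt
  have := main_loop paren.toList [] none (by intro e he; simp at he) hpre rfl
  simpa [opensOf, wprod, sval] using this
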